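-- pv_equiv track=rewrite | github.com/amol-ship-it/agi-core | domains/arc/transformation_primitives.py | extend_right_and_down
-- ===== SOURCE A (Python) =====
-- Grid = list[list[int]]
--
-- def extend_right_and_down(grid: Grid) -> Grid:
--     """Each non-zero pixel extends right to edge, then down along the right edge.
--
--     Forms an L-shape: horizontal ray rightward + vertical ray downward
--     from the rightmost point of the horizontal ray. Later (lower) pixels
--     overwrite earlier ones.
--
--     Justified by task 99fa7670.
--     """
--     if not grid or not grid[0]:
--         return grid
--     h, w = len(grid), len(grid[0])
--     # Collect source pixels sorted top-to-bottom
--     sources = [(r, c, grid[r][c]) for r in range(h) for c in range(w) if grid[r][c] != 0]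
--     sources.sort()  # top-to-bottom, left-to-right
--
--     result = [row[:] for row in grid]
--     for r, c, color in sources:
--         # Extend right to edge
--         for cc in range(c + 1, w):
--             result[r][cc] = color
--         # Extend down from the right edge
--         for rr in range(r + 1, h):
--             result[rr][w - 1] = color
--     return result
-- ===== SOURCE B (Python) =====
-- def extend_right_and_down(grid):
--     """One O(h*w) sweep: per-row running fill for interior columns, and a
--     running 'last painter' across rows for the last column."""
--     if not grid or not grid[0]:
--         return grid
--     w = len(grid[0])
--     last_global = None
--     out = []
--     for row in grid:
--         new_row = []
--         last_row = None
--         for v in row[:w - 1]: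
--             new_row.append(v if last_row is None else last_row)
--             if v != 0:
--                 last_row = v
--         v = row[w - 1]
--         painter = last_row if last_row is not None else last_global
--         new_row.append(v if painter is None else painter)
--         new_row.extend(row[w:])
--         out.append(new_row)
--         last_global = v if v != 0 else painter
--     return out
-- ===== Notes on version B (the rewrite author's own statement) =====
-- stated objective: faster
-- what changed: A collects all nonzero pixels and repaints a full rightward ray plus a full downward last-column ray per pixel (O(h*w*(h+w))); B makes one O(h*w) sweep keeping a per-row running fill colour for interior columns and a running cross-row 'last painter' for the last column.
import Mathlib
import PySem

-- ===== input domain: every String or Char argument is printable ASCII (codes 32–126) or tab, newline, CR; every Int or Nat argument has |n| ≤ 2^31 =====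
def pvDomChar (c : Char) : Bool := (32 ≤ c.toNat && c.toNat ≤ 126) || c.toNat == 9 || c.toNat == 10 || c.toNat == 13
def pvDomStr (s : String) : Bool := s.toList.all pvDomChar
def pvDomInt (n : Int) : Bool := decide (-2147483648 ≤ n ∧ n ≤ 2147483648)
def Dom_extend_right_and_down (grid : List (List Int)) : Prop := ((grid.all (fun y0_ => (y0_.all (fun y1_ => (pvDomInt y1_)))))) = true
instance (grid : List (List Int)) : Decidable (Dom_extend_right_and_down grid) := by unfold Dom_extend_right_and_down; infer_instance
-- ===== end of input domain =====

-- B replaces A's per-pixel ray repainting by a single sweep (per-row running fill colour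
-- for interior columns, a running cross-row last painter for the last column): asymptotically faster.

-- ===== PORT A =====
-- grid[r][c] (indices from range(): nonnegative, in range on Pre_ inputs)
def aGet (g : List (List Int)) (r c : Int) : Int :=
  PySem.List.pyGetD (PySem.List.pyGetD g r []) c 0

-- result[r][c] = v (indices from range(): nonnegative)
def aSet (g : List (List Int)) (r c : Int) (v : Int) : List (List Int) :=
  PySem.List.pySetD g r (PySem.List.pySetD (PySem.List.pyGetD g r []) c v)

-- body of A's loop over sources: extend right, then extend down along the right edge
def aPaint (h w : Int) (res : List (List Int)) (s : Int × Int × Int) : List (List Int) :=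
  let res1 := (PySem.List.pyRange (s.2.1 + 1) w 1).foldl (fun g cc => aSet g s.1 cc s.2.2) res
  (PySem.List.pyRange (s.1 + 1) h 1).foldl (fun g rr => aSet g rr (w - 1) s.2.2) res1

def extend_right_and_down (grid : List (List Int)) : List (List Int) :=
  if grid = [] ∨ grid.headD [] = [] then grid
  else
    let h : Int := grid.length
    let w : Int := (grid.headD []).length
    let sources : List (Int × Int × Int) :=
      (PySem.List.pyRange 0 h 1).flatMap (fun r =>
        ((PySem.List.pyRange 0 w 1).filter (fun c => decide (aGet grid r c ≠ 0))).map
          (fun c => (r, c, aGet grid r c)))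
    -- sources.sort(): Python compares the (r, c, colour) tuples; the (r, c) parts are
    -- pairwise distinct by construction, so the colour component never decides.
    let sources := PySem.List.sorted2 sources (fun s => s.1) (fun s => s.2.1)
    let result := grid.map (fun row => row)      -- [row[:] for row in grid]
    sources.foldl (aPaint h w) result

-- ===== PORT B =====
-- interior loop: running fill colour; returns the built cells and the final colour
def altScan (last : Option Int) : List Int → List Int × Option Int
  | [] => ([], last)
  | v :: rest =>
    let out := altScan (if v ≠ 0 then some v else last) rest
    ((match last with | none => v | some c => c) :: out.1, out.2)

-- row loop of B: lastG is the running last painter for the last column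
def altGo (w : Nat) (lastG : Option Int) : List (List Int) → List (List Int)
  | [] => []
  | row :: rest =>
    let sc := altScan none (row.take (w - 1))
    let v := row.getD (w - 1) 0
    let painter : Option Int := match sc.2 with | some c => some c | none => lastG
    (sc.1 ++ (match painter with | some c => c | none => v) :: row.drop w)
      :: altGo w (if v ≠ 0 then some v else painter) rest

def extend_right_and_down_alt (grid : List (List Int)) : List (List Int) :=
  if grid = [] ∨ grid.headD [] = [] then grid
  else altGo (grid.headD []).length none grid

-- ===== PRECONDITION & SPEC =====
-- Pre_ excludes exactly the inputs where A raises IndexError: some row shorter than the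
-- first row (A reads grid[r][c] for all c < len(grid[0])).
def Pre_extend_right_and_down (grid : List (List Int)) : Prop :=
  ∀ row ∈ grid, (grid.headD []).length ≤ row.length
instance (grid : List (List Int)) : Decidable (Pre_extend_right_and_down grid) := by
  unfold Pre_extend_right_and_down; infer_instance

def pvWitness_extend_right_and_down : List (List Int) := [[1, 0], [0, 2]]

def Spec_extend_right_and_down (grid : List (List Int)) (out : List (List Int)) : Prop :=
  out = extend_right_and_down_alt grid
instance (grid : List (List Int)) (out : List (List Int)) :
    Decidable (Spec_extend_right_and_down grid out) := by
  unfold Spec_extend_right_and_down; infer_instance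

-- ===== CLAIM (what is proved, stated in full; the proofs are below) =====
def Claim_equal_extend_right_and_down : Prop :=
  ∀ (grid : List (List Int)), Dom_extend_right_and_down grid →
    Pre_extend_right_and_down grid →
    Spec_extend_right_and_down grid (extend_right_and_down grid)

-- ===== LEMMAS AND PROOFS =====

-- cell value / row length, with defaults (all reasoning is through these)
def cell (g : List (List Int)) (i j : Nat) : Int := (g.getD i []).getD j 0
def rlen (g : List (List Int)) (i : Nat) : Nat := (g.getD i []).length

-- colour of the last nonzero entry of xs, else the accumulator
def lastNZ (a : Option Int) (xs : List Int) : Option Int :=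
  xs.foldl (fun acc v => if v ≠ 0 then some v else acc) a

-- a source in Nat form, and its Int-triple image used by port A
def toSrc (s : Nat × Nat × Int) : Int × Int × Int := ((s.1 : Int), (s.2.1 : Int), s.2.2)

-- does source s write cell (i, j) in A's painting? (vertical ray ∨ horizontal ray)
def writesN (W i j : Nat) (s : Nat × Nat × Int) : Bool :=
  (decide (j + 1 = W) && decide (s.1 < i)) ||
  (decide (i = s.1) && decide (s.2.1 < j) && decide (j < W))

-- colour of the last source in ss writing (i, j), else the accumulator
def lw (W i j : Nat) (a : Option Int) (ss : List (Nat × Nat × Int)) : Option Int :=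
  ss.foldl (fun acc s => if writesN W i j s then some s.2.2 else acc) a

-- A's source block of one row, in Nat form
def blockN (row : List Int) (r W : Nat) : List (Nat × Nat × Int) :=
  ((List.range W).filter (fun c => decide (row.getD c 0 ≠ 0))).map
    (fun (c : Nat) => (r, c, row.getD c 0))

-- A's source list from row index r on, in Nat form
def srcsN (W : Nat) : Nat → List (List Int) → List (Nat × Nat × Int)
  | _, [] => []
  | r, row :: rest => blockN row r W ++ srcsN W (r + 1) rest

-- ---------- small fold facts ----------

lemma lastNZ_append (a : Option Int) (xs ys : List Int) :
    lastNZ a (xs ++ ys) = lastNZ (lastNZ a xs) ys := by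
  simp [lastNZ, List.foldl_append]

lemma lastNZ_none (xs : List Int) : ∀ a,
    lastNZ a xs = match lastNZ none xs with | some c => some c | none => a := by
  induction xs with
  | nil => intro a; simp [lastNZ]
  | cons v rest ih =>
    intro a
    show lastNZ (if v ≠ 0 then some v else a) rest = _
    have h1 := ih (if v ≠ 0 then some v else a)
    have h2 : lastNZ none (v :: rest)
        = lastNZ (if v ≠ 0 then some v else none) rest := rfl
    rw [h1, h2, ih (if v ≠ 0 then some v else none)]
    cases h : lastNZ none rest <;> by_cases hv : v = 0 <;> simp [hv]

lemma lw_append (W i j : Nat) (a : Option Int) (xs ys : List (Nat × Nat × Int)) :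
    lw W i j a (xs ++ ys) = lw W i j (lw W i j a xs) ys := by
  simp [lw, List.foldl_append]

lemma lw_none (W i j : Nat) (ss : List (Nat × Nat × Int)) : ∀ a,
    lw W i j a ss = match lw W i j none ss with | some c => some c | none => a := by
  induction ss with
  | nil => intro a; simp [lw]
  | cons s rest ih =>
    intro a
    show lw W i j (if writesN W i j s then some s.2.2 else a) rest = _
    have h2 : lw W i j none (s :: rest)
        = lw W i j (if writesN W i j s then some s.2.2 else none) rest := rfl
    rw [ih (if writesN W i j s then some s.2.2 else a), h2,
      ih (if writesN W i j s then some s.2.2 else none)]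
    cases h : lw W i j none rest <;> by_cases hw : writesN W i j s <;> simp [hw]

lemma take_succ_getD {xs : List Int} {n : Nat} (h : n < xs.length) :
    xs.take (n + 1) = xs.take n ++ [xs.getD n 0] := by
  rw [List.take_add_one, List.getD_eq_getElem xs 0 h]
  simp [List.getElem?_eq_getElem h]

-- ---------- cell/rlen of writes ----------

lemma getD_set_list {α : Type} (l : List α) (r i : Nat) (x d : α) :
    (l.set r x).getD i d = if r = i ∧ r < l.length then x else l.getD i d := by
  rw [List.getD_eq_getElem?_getD, List.getElem?_set]
  by_cases h1 : r = i
  · subst h1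
    by_cases h2 : r < l.length <;> simp [h2, List.getD_eq_getElem?_getD]
  · simp [h1, List.getD_eq_getElem?_getD]

lemma cell_set (g : List (List Int)) (r c : Nat) (v : Int) (i j : Nat) :
    cell (g.set r ((g.getD r []).set c v)) i j
      = if i = r ∧ j = c ∧ r < g.length ∧ c < rlen g r then v else cell g i j := by
  unfold cell rlen
  rw [getD_set_list]
  by_cases h1 : r = i ∧ r < g.length
  · rw [if_pos h1]
    obtain ⟨h1a, h1b⟩ := h1
    subst h1a
    rw [getD_set_list]
    by_cases h2 : c = j ∧ c < (g.getD r []).length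
    · rw [if_pos h2, if_pos ⟨rfl, h2.1.symm, h1b, h2.2⟩]
    · rw [if_neg h2, if_neg (by tauto)]
  · rw [if_neg h1, if_neg (by tauto)]

lemma length_set_row (g : List (List Int)) (r : Nat) (row : List Int) :
    (g.set r row).length = g.length := by simp

lemma rlen_set (g : List (List Int)) (r c : Nat) (v : Int) (i : Nat) :
    rlen (g.set r ((g.getD r []).set c v)) i = rlen g i := by
  unfold rlen
  rw [getD_set_list]
  by_cases h1 : r = i ∧ r < g.length
  · rw [if_pos h1, List.length_set, h1.1]
  · rw [if_neg h1]

lemma aSet_natCast (g : List (List Int)) (r c : Nat) (v : Int) :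
    aSet g (r : Int) (c : Int) v = g.set r ((g.getD r []).set c v) := by
  simp [aSet]

-- ---------- fold of sets over a list of columns / rows ----------

lemma cell_setcols (r : Nat) (color : Int) (i j : Nat) :
    ∀ (L : List Nat) (g : List (List Int)),
    cell (L.foldl (fun g (cc : Nat) => aSet g (r : Int) (cc : Int) color) g) i j
      = if i = r ∧ j ∈ L ∧ i < g.length ∧ j < rlen g i then color else cell g i j := by
  intro L
  induction L with
  | nil => intro g; simp
  | cons cc L ih =>
    intro g
    show cell (L.foldl _ (aSet g (r : Int) (cc : Int) color)) i j = _
    rw [ih, aSet_natCast, cell_set, rlen_set, length_set_row]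
    by_cases hi : i = r <;> by_cases hlen : i < g.length <;>
      by_cases hj : j < rlen g i <;>
      by_cases hmem : j ∈ L <;> by_cases hc : j = cc <;>
      simp_all [List.mem_cons]

lemma cell_setrows (cN : Nat) (color : Int) (i j : Nat) :
    ∀ (L : List Nat) (g : List (List Int)),
    cell (L.foldl (fun g (rr : Nat) => aSet g (rr : Int) (cN : Int) color) g) i j
      = if i ∈ L ∧ j = cN ∧ i < g.length ∧ j < rlen g i then color else cell g i j := by
  intro L
  induction L with
  | nil => intro g; simp
  | cons rr L ih =>
    intro g
    show cell (L.foldl _ (aSet g (rr : Int) (cN : Int) color)) i j = _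
    rw [ih, aSet_natCast, cell_set, rlen_set, length_set_row]
    by_cases hi : i = rr <;> by_cases hlen : i < g.length <;>
      by_cases hj : j < rlen g i <;>
      by_cases hmem : i ∈ L <;> by_cases hc : j = cN <;>
      simp_all [List.mem_cons]

lemma rlen_foldl_cols (r : Nat) (color : Int) :
    ∀ (L : List Nat) (g : List (List Int)) (i : Nat),
    rlen (L.foldl (fun g (cc : Nat) => aSet g (r : Int) (cc : Int) color) g) i = rlen g i := by
  intro L
  induction L with
  | nil => intro g i; rfl
  | cons cc L ih =>
    intro g i
    show rlen (L.foldl _ (aSet g (r : Int) (cc : Int) color)) i = _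
    rw [ih, aSet_natCast, rlen_set]

lemma len_foldl_cols (r : Nat) (color : Int) :
    ∀ (L : List Nat) (g : List (List Int)),
    (L.foldl (fun g (cc : Nat) => aSet g (r : Int) (cc : Int) color) g).length = g.length := by
  intro L
  induction L with
  | nil => intro g; rfl
  | cons cc L ih =>
    intro g
    show (L.foldl _ (aSet g (r : Int) (cc : Int) color)).length = _
    rw [ih, aSet_natCast, length_set_row]

lemma rlen_foldl_rows (cN : Nat) (color : Int) :
    ∀ (L : List Nat) (g : List (List Int)) (i : Nat),
    rlen (L.foldl (fun g (rr : Nat) => aSet g (rr : Int) (cN : Int) color) g) i = rlen g i := by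
  intro L
  induction L with
  | nil => intro g i; rfl
  | cons rr L ih =>
    intro g i
    show rlen (L.foldl _ (aSet g (rr : Int) (cN : Int) color)) i = _
    rw [ih, aSet_natCast, rlen_set]

lemma len_foldl_rows (cN : Nat) (color : Int) :
    ∀ (L : List Nat) (g : List (List Int)),
    (L.foldl (fun g (rr : Nat) => aSet g (rr : Int) (cN : Int) color) g).length = g.length := by
  intro L
  induction L with
  | nil => intro g; rfl
  | cons rr L ih =>
    intro g
    show (L.foldl _ (aSet g (rr : Int) (cN : Int) color)).length = _
    rw [ih, aSet_natCast, length_set_row]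

lemma mem_map_range_add (a n j : Nat) :
    (j ∈ (List.range n).map (fun k => a + k)) ↔ (a ≤ j ∧ j < a + n) := by
  simp only [List.mem_map, List.mem_range]
  constructor
  · rintro ⟨k, hk, rfl⟩; omega
  · rintro ⟨h1, h2⟩; exact ⟨j - a, by omega, by omega⟩

-- the two pyRange folds of aPaint, as folds over Nat column/row lists
lemma pyRange_cast_add (a b : Nat) :
    PySem.List.pyRange ((a : Int)) ((b : Int)) 1
      = ((List.range (b - a)).map (fun k => a + k)).map (fun n : Nat => (n : Int)) := by
  rw [PySem.List.pyRange_one]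
  simp [List.map_map, Function.comp]

-- ---------- paint of one source, per cell ----------

lemma paint_cast_folds (H W : Nat) (hW1 : 1 ≤ W) (r c : Nat) (v : Int)
    (g : List (List Int)) :
    aPaint (H : Int) (W : Int) g (toSrc (r, c, v))
      = ((List.range (H - (r + 1))).map (fun k => (r + 1) + k)).foldl
          (fun g (rr : Nat) => aSet g (rr : Int) ((W - 1 : Nat) : Int) v)
          (((List.range (W - (c + 1))).map (fun k => (c + 1) + k)).foldl
            (fun g (cc : Nat) => aSet g (r : Int) (cc : Int) v) g) := by
  unfold aPaint toSrc
  have hc1 : ((c : Int) + 1) = ((c + 1 : Nat) : Int) := by push_cast; ring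
  have hr1 : ((r : Int) + 1) = ((r + 1 : Nat) : Int) := by push_cast; ring
  have hw1 : ((W : Int) - 1) = ((W - 1 : Nat) : Int) := by omega
  simp only [hc1, hr1, hw1, pyRange_cast_add, List.foldl_map]

lemma cell_paint (H W : Nat) (s : Nat × Nat × Int) (g : List (List Int)) (i j : Nat)
    (hH : g.length = H) (hi : i < H) (hj : j < rlen g i) (_hW : W ≤ rlen g i)
    (hW1 : 1 ≤ W) :
    cell (aPaint (H : Int) (W : Int) g (toSrc s)) i j
      = if writesN W i j s then s.2.2 else cell g i j := by
  obtain ⟨r, c, v⟩ := s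
  rw [paint_cast_folds H W hW1, cell_setrows, len_foldl_cols, rlen_foldl_cols,
    cell_setcols]
  simp only [mem_map_range_add, writesN]
  have hlen : i < g.length := by omega
  have hjr : j < rlen g i := hj
  by_cases h1 : j + 1 = W ∧ r < i
  · rw [if_pos (by omega : (r + 1 ≤ i ∧ i < r + 1 + (H - (r + 1))) ∧ j = W - 1 ∧
      i < g.length ∧ j < rlen g i)]
    simp [h1.1, h1.2]
  · by_cases h2 : i = r ∧ c < j ∧ j < W
    · rw [if_neg (by omega), if_pos (by omega : i = r ∧
        (c + 1 ≤ j ∧ j < c + 1 + (W - (c + 1))) ∧ i < g.length ∧ j < rlen g i)]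
      simp [h2.1, h2.2.1, h2.2.2]
    · rw [if_neg (by omega), if_neg (by omega)]
      rw [if_neg (by
        simp only [Bool.or_eq_true, Bool.and_eq_true, decide_eq_true_eq]
        omega)]

lemma len_paint (H W : Nat) (hW1 : 1 ≤ W) (s : Nat × Nat × Int)
    (g : List (List Int)) :
    (aPaint (H : Int) (W : Int) g (toSrc s)).length = g.length := by
  obtain ⟨r, c, v⟩ := s
  rw [paint_cast_folds H W hW1, len_foldl_rows, len_foldl_cols]

lemma rlen_paint (H W : Nat) (hW1 : 1 ≤ W) (s : Nat × Nat × Int)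
    (g : List (List Int)) (i : Nat) :
    rlen (aPaint (H : Int) (W : Int) g (toSrc s)) i = rlen g i := by
  obtain ⟨r, c, v⟩ := s
  rw [paint_cast_folds H W hW1, rlen_foldl_rows, rlen_foldl_cols]

-- ---------- the whole fold over sources, per cell ----------

lemma cell_foldl_paint (H W i j : Nat) (hW1 : 1 ≤ W) :
    ∀ (ss : List (Nat × Nat × Int)) (g : List (List Int)),
    g.length = H → i < H → j < rlen g i → W ≤ rlen g i →
    cell (ss.foldl (fun g s => aPaint (H : Int) (W : Int) g (toSrc s)) g) i j
      = match lw W i j none ss with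
        | some col => col
        | none => cell g i j := by
  intro ss
  induction ss with
  | nil => intro g _ _ _ _; simp [lw]
  | cons s rest ih =>
    intro g hH hi hj hWr
    show cell (rest.foldl _ (aPaint (H : Int) (W : Int) g (toSrc s))) i j = _
    rw [ih (aPaint (H : Int) (W : Int) g (toSrc s))
      (by rw [len_paint H W hW1, hH]) hi (by rwa [rlen_paint H W hW1]) (by rwa [rlen_paint H W hW1])]
    rw [cell_paint H W s g i j hH hi hj hWr hW1]
    have h2 : lw W i j none (s :: rest)
        = lw W i j (if writesN W i j s then some s.2.2 else none) rest := rfl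
    rw [h2, lw_none W i j rest (if writesN W i j s then some s.2.2 else none)]
    cases h : lw W i j none rest <;> by_cases hw : writesN W i j s <;> simp [hw]

-- ---------- evaluating lw over blocks ----------

lemma filter_fold_all (row : List Int) (a : Option Int) :
    ∀ (W : Nat),
    ((List.range W).filter (fun c => decide (row.getD c 0 ≠ 0))).foldl
      (fun _acc c => some (row.getD c 0)) a = lastNZ a (row.take W) := by
  intro W
  induction W with
  | zero => simp [lastNZ]
  | succ W ih =>
    rw [List.range_succ, List.filter_append, List.foldl_append, ih]
    by_cases hlen : W < row.length
    · rw [take_succ_getD hlen, lastNZ_append]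
      by_cases h0 : row.getD W 0 = 0
      · rw [List.getD_eq_getElem?_getD] at h0
        have hf : List.filter (fun c => decide (row.getD c 0 ≠ 0)) [W] = [] := by
          simp [List.getD_eq_getElem?_getD, h0]
        rw [hf]
        simp [lastNZ, List.getD_eq_getElem?_getD, h0]
      · rw [List.getD_eq_getElem?_getD] at h0
        have hf : List.filter (fun c => decide (row.getD c 0 ≠ 0)) [W] = [W] := by
          simp [List.getD_eq_getElem?_getD, h0]
        rw [hf]
        simp [lastNZ, List.getD_eq_getElem?_getD, h0]
    · have h1 : row.getD W 0 = 0 := List.getD_eq_default _ _ (by omega)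
      rw [List.getD_eq_getElem?_getD] at h1
      have h2 : row.take (W + 1) = row.take W := by
        rw [List.take_of_length_le (by omega), List.take_of_length_le (by omega)]
      simp [h1, h2, List.getD_eq_getElem?_getD]

lemma filter_fold_guard (row : List Int) (j : Nat) (a : Option Int) :
    ∀ (W : Nat), j ≤ W →
    ((List.range W).filter (fun c => decide (row.getD c 0 ≠ 0))).foldl
      (fun acc c => if c < j then some (row.getD c 0) else acc) a
      = lastNZ a (row.take j) := by
  intro W hjW
  have hsplit : List.range W = List.range j ++ (List.range (W - j)).map (fun k => j + k) := by
    rw [← List.range_add]; congr 1; omega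
  rw [hsplit, List.filter_append, List.foldl_append]
  have h1 : ((List.range j).filter (fun c => decide (row.getD c 0 ≠ 0))).foldl
      (fun acc c => if c < j then some (row.getD c 0) else acc) a
      = lastNZ a (row.take j) := by
    rw [PySem.List.foldl_congr_mem _ _ (fun acc c => some (row.getD c 0)) a
      (by intro _acc c hc
          have : c < j := List.mem_range.mp (List.mem_filter.mp hc).1
          simp [this])]
    exact filter_fold_all row a j
  rw [h1]
  rw [PySem.List.foldl_congr_mem _ _ (fun acc c => acc) _
    (by intro _acc c hc
        have hm := (List.mem_filter.mp hc).1
        rw [List.mem_map] at hm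
        obtain ⟨k, _, rfl⟩ := hm
        simp)]
  exact PySem.List.foldl_ignore _ _

lemma lw_block_eval (row : List Int) (r W i j : Nat) (a : Option Int) :
    lw W i j a (blockN row r W)
      = if i = r then (if j < W then lastNZ a (row.take j) else a)
        else if r < i ∧ j + 1 = W then lastNZ a (row.take W)
        else a := by
  unfold lw blockN
  rw [List.foldl_map]
  by_cases hir : i = r
  · subst hir
    by_cases hjW : j < W
    · simp only [if_pos hjW]
      rw [PySem.List.foldl_congr_mem _ _
        (fun acc c => if c < j then some (row.getD c 0) else acc) a
        (by intro _acc c hc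
            simp only [writesN]
            by_cases h : c < j <;> simp [h, hjW])]
      exact filter_fold_guard row j a W (by omega)
    · simp only [if_neg hjW]
      rw [PySem.List.foldl_congr_mem _ _ (fun acc c => acc) a
        (by intro _acc c hc
            simp only [writesN]
            simp [hjW])]
      exact PySem.List.foldl_ignore _ _
  · by_cases hv : r < i ∧ j + 1 = W
    · simp only [if_neg hir, if_pos hv]
      rw [PySem.List.foldl_congr_mem _ _ (fun acc c => some (row.getD c 0)) a
        (by intro _acc c hc
            simp only [writesN]
            simp [hv.1, hv.2, hir])]
      exact filter_fold_all row a W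
    · simp only [if_neg hir, if_neg hv]
      rw [PySem.List.foldl_congr_mem _ _ (fun acc c => acc) a
        (by intro _acc c hc
            simp only [writesN]
            have : ¬ (r < i) ∨ ¬ (j + 1 = W) := by tauto
            rcases this with h | h <;> simp [h, hir])]
      exact PySem.List.foldl_ignore _ _

lemma blockN_fst (row : List Int) (r W : Nat) :
    ∀ s ∈ blockN row r W, s.1 = r := by
  intro s hs
  unfold blockN at hs
  rw [List.mem_map] at hs
  obtain ⟨c, _, rfl⟩ := hs
  rfl

lemma lw_srcsN_above (W i j : Nat) :
    ∀ (rows : List (List Int)) (r : Nat) (a : Option Int), i < r →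
    lw W i j a (srcsN W r rows) = a := by
  intro rows
  induction rows with
  | nil => intro r a _; simp [srcsN, lw]
  | cons row rest ih =>
    intro r a hir
    show lw W i j a (blockN row r W ++ srcsN W (r + 1) rest) = a
    rw [lw_append, lw_block_eval]
    have h1 : ¬ (i = r) := by omega
    have h2 : ¬ (r < i ∧ j + 1 = W) := by omega
    rw [if_neg h1, if_neg h2]
    exact ih (r + 1) a (by omega)

-- the centre of the argument: what A's ordered repainting leaves at cell (r + k, j)
lemma lw_srcsN (W j : Nat) (hW1 : 1 ≤ W) :
    ∀ (rows : List (List Int)) (r k : Nat) (a : Option Int),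
    lw W (r + k) j a (srcsN W r rows)
      = if j + 1 < W then lastNZ a ((rows.getD k []).take j)
        else if j + 1 = W then
          lastNZ (lastNZ a ((rows.take k).flatMap (fun row => row.take W)))
            ((rows.getD k []).take (W - 1))
        else a := by
  intro rows
  induction rows with
  | nil =>
    intro r k a
    simp only [srcsN, lw, List.foldl_nil, List.getD_nil, List.take_nil,
      List.flatMap_nil]
    simp [lastNZ]
  | cons row rest ih =>
    intro r k a
    show lw W (r + k) j a (blockN row r W ++ srcsN W (r + 1) rest) = _
    rw [lw_append, lw_block_eval]
    cases k with
    | zero =>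
      rw [if_pos (by omega : r + 0 = r)]
      rw [lw_srcsN_above W (r + 0) j rest (r + 1) _ (by omega)]
      by_cases h1 : j + 1 < W
      · rw [if_pos (by omega : j < W), if_pos h1]
        simp
      · by_cases h2 : j + 1 = W
        · rw [if_pos (by omega : j < W), if_neg h1, if_pos h2]
          simp only [List.take_zero, List.flatMap_nil]
          have : W - 1 = j := by omega
          rw [this]
          simp [lastNZ]
        · rw [if_neg (by omega : ¬ j < W), if_neg h1, if_neg h2]
    | succ k =>
      rw [if_neg (by omega : ¬ (r + (k + 1) = r))]
      by_cases hjW : j + 1 = W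
      · rw [if_pos ⟨by omega, hjW⟩]
        have hidx : r + (k + 1) = (r + 1) + k := by omega
        rw [hidx, ih (r + 1) k]
        have hlt : ¬ (j + 1 < W) := by omega
        rw [if_neg hlt, if_pos hjW, if_neg hlt, if_pos hjW]
        simp only [List.take_succ_cons, List.flatMap_cons, List.getD_cons_succ,
          lastNZ_append]
      · rw [if_neg (by omega : ¬ (r < r + (k + 1) ∧ j + 1 = W))]
        have hidx : r + (k + 1) = (r + 1) + k := by omega
        rw [hidx, ih (r + 1) k]
        by_cases hlt : j + 1 < W
        · rw [if_pos hlt, if_pos hlt]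
          simp only [List.getD_cons_succ]
        · rw [if_neg hlt, if_neg hjW, if_neg hlt, if_neg hjW]

-- ---------- sources of port A equal srcsN ----------

lemma srcsN_flatMap (W : Nat) :
    ∀ (rows : List (List Int)) (b : Nat),
    srcsN W b rows
      = (List.range rows.length).flatMap (fun r => blockN (rows.getD r []) (b + r) W) := by
  intro rows
  induction rows with
  | nil => intro b; simp [srcsN]
  | cons row rest ih =>
    intro b
    show blockN row b W ++ srcsN W (b + 1) rest = _
    rw [List.length_cons, List.range_succ_eq_map, List.flatMap_cons,
      List.flatMap_map]
    have hsh : ∀ r : Nat, blockN ((row :: rest).getD (r + 1) []) (b + (r + 1)) W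
        = blockN (rest.getD r []) ((b + 1) + r) W := by
      intro r
      rw [List.getD_cons_succ, show b + (r + 1) = (b + 1) + r by omega]
    simp only [Nat.succ_eq_add_one, hsh]
    rw [ih (b + 1)]
    simp

lemma sources_eq (g : List (List Int)) :
    (PySem.List.pyRange 0 (g.length : Int) 1).flatMap (fun r =>
        ((PySem.List.pyRange 0 ((g.headD []).length : Int) 1).filter
          (fun c => decide (aGet g r c ≠ 0))).map (fun c => (r, c, aGet g r c)))
      = (srcsN (g.headD []).length 0 g).map toSrc := by
  rw [PySem.List.pyRange_zero_nat, PySem.List.pyRange_zero_nat, List.flatMap_map]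
  have hbody : ∀ r : Nat,
      ((((List.range (g.headD []).length).map (fun k : Nat => (k : Int))).filter
        (fun c => decide (aGet g (r : Int) c ≠ 0))).map
          (fun c => ((r : Int), c, aGet g (r : Int) c)))
      = (blockN (g.getD r []) r (g.headD []).length).map toSrc := by
    intro r
    have hval : ∀ (c : Nat), aGet g (r : Int) (c : Int) = (g.getD r []).getD c 0 := by
      intro c; simp [aGet]
    rw [List.filter_map, List.map_map]
    unfold blockN
    rw [List.map_map]
    have hpred : ((fun c => decide (aGet g (r : Int) c ≠ 0)) ∘ (fun (k : Nat) => (k : Int)))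
        = (fun c => decide ((g.getD r []).getD c 0 ≠ 0)) := by
      funext c; simp [Function.comp, hval]
    rw [hpred]
    apply List.map_congr_left
    intro c hc
    simp [Function.comp, toSrc, hval]
  simp only [hbody]
  rw [← List.map_flatMap]
  congr 1
  rw [srcsN_flatMap]
  simp

lemma srcsN_fst_ge (W : Nat) :
    ∀ (rows : List (List Int)) (r : Nat), ∀ s ∈ srcsN W r rows, r ≤ s.1 := by
  intro rows
  induction rows with
  | nil => intro r s hs; simp [srcsN] at hs
  | cons row rest ih =>
    intro r s hs
    rcases List.mem_append.mp hs with h | h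
    · rw [blockN_fst row r W s h]
    · have := ih (r + 1) s h; omega

lemma pairwise_blockN (row : List Int) (r W : Nat) :
    (blockN row r W).Pairwise
      (fun a b => a.1 < b.1 ∨ (a.1 = b.1 ∧ a.2.1 < b.2.1)) := by
  unfold blockN
  rw [List.pairwise_map]
  apply List.Pairwise.filter
  apply (List.pairwise_lt_range).imp
  intro a b hab
  exact Or.inr ⟨rfl, hab⟩

lemma pairwise_srcsN (W : Nat) :
    ∀ (rows : List (List Int)) (r : Nat),
    (srcsN W r rows).Pairwise
      (fun a b => a.1 < b.1 ∨ (a.1 = b.1 ∧ a.2.1 < b.2.1)) := by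
  intro rows
  induction rows with
  | nil => intro r; simp [srcsN]
  | cons row rest ih =>
    intro r
    show (blockN row r W ++ srcsN W (r + 1) rest).Pairwise _
    rw [List.pairwise_append]
    refine ⟨pairwise_blockN row r W, ih (r + 1), ?_⟩
    intro a ha b hb
    have h1 : a.1 = r := blockN_fst row r W a ha
    have h2 : r + 1 ≤ b.1 := srcsN_fst_ge W rest (r + 1) b hb
    exact Or.inl (by omega)

lemma foldl_insertBy_eq_self (before : (Int × Int × Int) → (Int × Int × Int) → Bool) :
    ∀ (xs : List (Int × Int × Int)),
    xs.Pairwise (fun a b => before b a = false) →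
    xs.foldl (fun acc x => PySem.List.insertBy before x acc) [] = xs := by
  intro xs
  induction xs using List.reverseRecOn with
  | nil => intro _; rfl
  | append_singleton l x ih =>
    intro h
    rw [List.pairwise_append] at h
    rw [List.foldl_append, ih h.1]
    exact PySem.List.insertBy_of_forall_not_before before x l
      (fun y hy => h.2.2 y hy x (by simp))

lemma sorted2_eq_self (xs : List (Int × Int × Int))
    (h : xs.Pairwise (fun a b => a.1 < b.1 ∨ (a.1 = b.1 ∧ a.2.1 < b.2.1))) :
    PySem.List.sorted2 xs (fun s => s.1) (fun s => s.2.1) false = xs := by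
  have hb := foldl_insertBy_eq_self
    (fun a b => decide (a.1 < b.1) || (!decide (b.1 < a.1) && decide (a.2.1 < b.2.1)))
    xs
    (h.imp (by
      intro a b hab
      rcases hab with h1 | ⟨h1, h2⟩ <;> simp <;> omega))
  exact hb

-- ---------- port B, per cell ----------

lemma altScan_snd : ∀ (cells : List Int) (a : Option Int),
    (altScan a cells).2 = lastNZ a cells := by
  intro cells
  induction cells with
  | nil => intro a; simp [altScan, lastNZ]
  | cons v rest ih =>
    intro a
    show (altScan (if v ≠ 0 then some v else a) rest).2 = _
    rw [ih]
    rfl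

lemma altScan_fst_len : ∀ (cells : List Int) (a : Option Int),
    (altScan a cells).1.length = cells.length := by
  intro cells
  induction cells with
  | nil => intro a; simp [altScan]
  | cons v rest ih =>
    intro a
    show ((match a with | none => v | some c => c) :: (altScan _ rest).1).length = _
    simp [ih]

lemma altScan_fst_getD : ∀ (cells : List Int) (a : Option Int) (j : Nat),
    j < cells.length →
    (altScan a cells).1.getD j 0
      = match lastNZ a (cells.take j) with
        | some c => c
        | none => cells.getD j 0 := by
  intro cells
  induction cells with
  | nil => intro a j h; simp at h
  | cons v rest ih =>
    intro a j hj
    cases j with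
    | zero =>
      show ((match a with | none => v | some c => c) :: _).getD 0 0 = _
      cases a <;> simp [lastNZ]
    | succ j =>
      show ((match a with | none => v | some c => c) :: (altScan _ rest).1).getD (j+1) 0 = _
      have : ((match a with | none => v | some c => c) :: (altScan (if v ≠ 0 then some v else a) rest).1).getD (j+1) 0 = (altScan (if v ≠ 0 then some v else a) rest).1.getD j 0 := rfl
      rw [this, ih _ j (by simpa using hj)]
      have hstep : lastNZ a ((v :: rest).take (j + 1))
          = lastNZ (if v ≠ 0 then some v else a) (rest.take j) := rfl
      rw [← hstep]
      rfl

lemma length_altGo (W : Nat) : ∀ (rows : List (List Int)) (L : Option Int),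
    (altGo W L rows).length = rows.length := by
  intro rows
  induction rows with
  | nil => intro L; rfl
  | cons row rest ih => intro L; simp [altGo, ih]

lemma rlen_altGo (W : Nat) (hW1 : 1 ≤ W) :
    ∀ (rows : List (List Int)) (L : Option Int) (i : Nat),
    (∀ row ∈ rows, W ≤ row.length) →
    rlen (altGo W L rows) i = rlen rows i := by
  intro rows
  induction rows with
  | nil => intro L i _; rfl
  | cons row rest ih =>
    intro L i hlen
    have hrow : W ≤ row.length := hlen row (by simp)
    cases i with
    | zero =>
      show rlen (_ :: _) 0 = rlen (row :: rest) 0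
      unfold rlen
      simp only [List.getD_cons_zero, List.length_append, List.length_cons,
        altScan_fst_len, List.length_take, List.length_drop]
      omega
    | succ i =>
      show rlen (_ :: altGo W _ rest) (i + 1) = rlen (row :: rest) (i + 1)
      unfold rlen
      simp only [List.getD_cons_succ]
      exact ih _ i (fun r hr => hlen r (by simp [hr]))

lemma lastG_step (W : Nat) (hW1 : 1 ≤ W) (row : List Int) (hlen : W ≤ row.length)
    (L : Option Int) :
    (if row.getD (W - 1) 0 ≠ 0 then some (row.getD (W - 1) 0)
     else match lastNZ none (row.take (W - 1)) with | some c => some c | none => L)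
      = lastNZ L (row.take W) := by
  have h1 : row.take W = row.take (W - 1) ++ [row.getD (W - 1) 0] := by
    conv_lhs => rw [show W = W - 1 + 1 by omega]
    rw [take_succ_getD (by omega)]
  rw [h1, lastNZ_append, ← lastNZ_none (row.take (W - 1)) L]
  rfl

lemma cell_cons_zero (x : List Int) (l : List (List Int)) (j : Nat) :
    cell (x :: l) 0 j = x.getD j 0 := rfl

lemma cell_cons_succ (x : List Int) (l : List (List Int)) (i j : Nat) :
    cell (x :: l) (i + 1) j = cell l i j := rfl

lemma cell_altGo (W : Nat) (hW1 : 1 ≤ W) :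
    ∀ (rows : List (List Int)) (L : Option Int) (i j : Nat),
    (∀ row ∈ rows, W ≤ row.length) → i < rows.length → j < rlen rows i →
    cell (altGo W L rows) i j
      = if j + 1 < W then
          (match lastNZ none ((rows.getD i []).take j) with
           | some c => c | none => cell rows i j)
        else if j + 1 = W then
          (match lastNZ (lastNZ L ((rows.take i).flatMap (fun row => row.take W)))
              ((rows.getD i []).take (W - 1)) with
           | some c => c | none => cell rows i j)
        else cell rows i j := by
  intro rows
  induction rows with
  | nil => intro L i j _ hi _; simp at hi
  | cons row rest ih =>
    intro L i j hlen hi hj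
    have hrow : W ≤ row.length := hlen row (by simp)
    cases i with
    | zero =>
      have hjrow : j < row.length := by
        unfold rlen at hj; simpa using hj
      have hsclen : (altScan none (row.take (W - 1))).1.length = W - 1 := by
        rw [altScan_fst_len, List.length_take]; omega
      simp only [altGo, cell_cons_zero]
      by_cases hj1 : j + 1 < W
      · rw [List.getD_append _ _ _ j (by rw [hsclen]; omega)]
        rw [altScan_fst_getD _ _ j (by rw [List.length_take]; omega)]
        rw [List.take_take, show min j (W - 1) = j by omega]
        have hgd : (row.take (W - 1)).getD j 0 = row.getD j 0 := by
          rw [List.getD_eq_getElem?_getD, List.getElem?_take, if_pos (by omega),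
            ← List.getD_eq_getElem?_getD]
        rw [hgd, if_pos hj1]
        simp only [List.getD_cons_zero]
      · by_cases hj2 : j + 1 = W
        · rw [show j = W - 1 by omega]
          rw [List.getD_append_right _ _ _ (W - 1) (by rw [hsclen])]
          rw [hsclen, Nat.sub_self]
          simp only [List.getD_cons_zero, altScan_snd]
          rw [if_neg (by omega), if_pos (by omega)]
          simp only [List.take_zero, List.flatMap_nil]
          rw [show lastNZ L [] = L from rfl]
          rw [lastNZ_none (row.take (W - 1)) L]
        · rw [List.getD_append_right _ _ _ j (by rw [hsclen]; omega)]
          rw [hsclen, show j - (W - 1) = (j - W) + 1 by omega]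
          simp only [List.getD_cons_succ]
          rw [List.getD_eq_getElem?_getD, List.getElem?_drop,
            show W + (j - W) = j by omega, ← List.getD_eq_getElem?_getD]
          rw [if_neg hj1, if_neg hj2]
    | succ i =>
      simp only [altGo, cell_cons_succ]
      simp only [altScan_snd]
      rw [lastG_step W hW1 row hrow L]
      rw [ih (lastNZ L (row.take W)) i j (fun r hr => hlen r (by simp [hr]))
        (by simpa using hi) (by unfold rlen at hj ⊢; simpa using hj)]
      simp only [List.getD_cons_succ, List.take_succ_cons, List.flatMap_cons,
        lastNZ_append]

-- ---------- extensionality ----------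

lemma grid_ext (g₁ g₂ : List (List Int)) (h1 : g₁.length = g₂.length)
    (h2 : ∀ i, i < g₁.length → rlen g₁ i = rlen g₂ i)
    (h3 : ∀ i j, i < g₁.length → j < rlen g₁ i → cell g₁ i j = cell g₂ i j) :
    g₁ = g₂ := by
  apply List.ext_getElem h1
  intro i hi1 hi2
  apply List.ext_getElem
  · have := h2 i hi1
    unfold rlen at this
    rwa [List.getD_eq_getElem _ _ hi1, List.getD_eq_getElem _ _ hi2] at this
  · intro j hj1 hj2
    have := h3 i j hi1 (by unfold rlen; rwa [List.getD_eq_getElem _ _ hi1])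
    unfold cell at this
    rw [List.getD_eq_getElem _ _ hi1, List.getD_eq_getElem _ _ hi2,
      List.getD_eq_getElem _ _ hj1, List.getD_eq_getElem _ _ hj2] at this
    exact this

lemma len_foldl_paintN (H W : Nat) (hW1 : 1 ≤ W) :
    ∀ (ss : List (Nat × Nat × Int)) (g : List (List Int)),
    (ss.foldl (fun g s => aPaint (H : Int) (W : Int) g (toSrc s)) g).length
      = g.length := by
  intro ss
  induction ss with
  | nil => intro g; rfl
  | cons x ss ih =>
    intro g
    show (ss.foldl _ (aPaint (H : Int) (W : Int) g (toSrc x))).length = _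
    rw [ih, len_paint H W hW1]

lemma rlen_foldl_paintN (H W : Nat) (hW1 : 1 ≤ W) :
    ∀ (ss : List (Nat × Nat × Int)) (g : List (List Int)) (i : Nat),
    rlen (ss.foldl (fun g s => aPaint (H : Int) (W : Int) g (toSrc s)) g) i
      = rlen g i := by
  intro ss
  induction ss with
  | nil => intro g i; rfl
  | cons x ss ih =>
    intro g i
    show rlen (ss.foldl _ (aPaint (H : Int) (W : Int) g (toSrc x))) i = _
    rw [ih, rlen_paint H W hW1]

-- ===== VERDICT (by name: the statement is the Claim_ definition above) =====
theorem extend_right_and_down_spec : Claim_equal_extend_right_and_down := by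
  unfold Claim_equal_extend_right_and_down
  intro grid _ hPre
  unfold Spec_extend_right_and_down extend_right_and_down extend_right_and_down_alt
  by_cases hguard : grid = [] ∨ grid.headD [] = []
  · rw [if_pos hguard, if_pos hguard]
  · rw [if_neg hguard, if_neg hguard]
    rw [not_or] at hguard
    have hW1 : 1 ≤ (grid.headD []).length := by
      rcases hg : grid.headD [] with _ | ⟨a, l⟩
      · exact absurd hg hguard.2
      · simp
    have hlen : ∀ row ∈ grid, (grid.headD []).length ≤ row.length := hPre
    have hpw2 : ((srcsN (grid.headD []).length 0 grid).map toSrc).Pairwise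
        (fun a b => a.1 < b.1 ∨ (a.1 = b.1 ∧ a.2.1 < b.2.1)) := by
      rw [List.pairwise_map]
      apply (pairwise_srcsN (grid.headD []).length grid 0).imp
      intro a b hab
      simp only [toSrc]
      rcases hab with h | ⟨h1, h2⟩
      · exact Or.inl (by exact_mod_cast h)
      · exact Or.inr ⟨by exact_mod_cast h1, by exact_mod_cast h2⟩
    simp only [sources_eq grid, sorted2_eq_self _ hpw2, List.foldl_map,
      List.map_id']
    apply grid_ext
    · rw [len_foldl_paintN _ _ hW1, length_altGo]
    · intro i hi
      rw [rlen_foldl_paintN _ _ hW1, rlen_altGo _ hW1 _ _ _ hlen]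
    · intro i j hi hj
      rw [len_foldl_paintN _ _ hW1] at hi
      rw [rlen_foldl_paintN _ _ hW1] at hj
      have hWr : (grid.headD []).length ≤ rlen grid i := by
        apply hlen
        rw [rlen] at *
        rw [List.getD_eq_getElem _ _ hi]
        exact List.getElem_mem _
      rw [cell_foldl_paint grid.length (grid.headD []).length i j hW1 _ grid
        rfl hi hj hWr]
      rw [cell_altGo _ hW1 grid none i j hlen hi hj]
      have hlw := lw_srcsN (grid.headD []).length j hW1 grid 0 i none
      rw [Nat.zero_add] at hlw
      rw [hlw]
      by_cases hj1 : j + 1 < (grid.headD []).length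
      · rw [if_pos hj1, if_pos hj1]
      · by_cases hj2 : j + 1 = (grid.headD []).length
        · rw [if_neg hj1, if_pos hj2, if_neg hj1, if_pos hj2]
        · rw [if_neg hj1, if_neg hj2, if_neg hj1, if_neg hj2]
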